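-- pv_equiv track=rewrite | github.com/IvanLyovkin/CodewarsKatas | 7 kyu/Mobile Display Keystrokes.py | mobile_keyboard
-- ===== SOURCE A (Python) =====
-- def mobile_keyboard(s):
--     mob = {'a': 2, 'b': 3, 'c': 4, 'd': 2, 'e': 3, 'f': 4, 'g': 2, 'h': 3, 'i': 4, 'j': 2, 'k': 3, 'l': 4, 'm': 2,
--         'n': 3, 'o': 4, 'p': 2, 'q': 3, 'r': 4, 's': 5, 't': 2, 'u': 3, 'v': 4, 'w': 2, 'x': 3, 'y': 4, 'z': 5}
--     c = 0
--     for i in range(len(s)):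
--         if s[i] in mob:
--             c += mob[s[i]]
--         else:
--             c += 1
--     return c
-- ===== SOURCE B (Python) =====
-- def keystrokes(c):
--     # closed-form keypad cost: no table at all
--     if not ('a' <= c <= 'z'):
--         return 1
--     if c == 's' or c == 'z':
--         return 5
--     k = ord(c) - ord('a') - (c > 's')
--     return k % 3 + 2
--
-- def mobile_keyboard(s):
--     return sum(keystrokes(c) for c in s)
-- ===== Notes on version B (the rewrite author's own statement) =====
-- stated objective: alternative
-- what changed: Replaces the 26-entry precomputed keystroke dict with a table-free closed-form arithmetic cost: for a lowercase letter the cost is (alphabet index, shifted past 's') mod 3 + 2, with 's' and 'z' handled as the 5-stroke group ends; both per-character passes then sum the costs.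
import Mathlib
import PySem

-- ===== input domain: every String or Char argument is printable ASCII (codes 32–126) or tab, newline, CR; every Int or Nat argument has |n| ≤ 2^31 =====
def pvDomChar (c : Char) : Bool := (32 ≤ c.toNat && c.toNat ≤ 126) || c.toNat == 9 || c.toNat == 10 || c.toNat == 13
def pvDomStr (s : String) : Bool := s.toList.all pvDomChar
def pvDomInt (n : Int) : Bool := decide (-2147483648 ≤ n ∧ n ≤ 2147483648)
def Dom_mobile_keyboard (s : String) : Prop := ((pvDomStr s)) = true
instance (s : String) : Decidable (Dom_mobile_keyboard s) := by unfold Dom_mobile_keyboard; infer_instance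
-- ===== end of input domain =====

-- B replaces A's precomputed per-letter keystroke dict with a table-free arithmetic
-- closed form ((index shifted past 's') mod 3 + 2, with 's'/'z' as group ends) (objective: alternative).

-- ===== PORT A =====
-- the dict literal 'mob'
def pvMob : PySem.Dict Char Int :=
  PySem.Dict.mk [('a', 2), ('b', 3), ('c', 4), ('d', 2), ('e', 3), ('f', 4), ('g', 2),
    ('h', 3), ('i', 4), ('j', 2), ('k', 3), ('l', 4), ('m', 2), ('n', 3), ('o', 4),
    ('p', 2), ('q', 3), ('r', 4), ('s', 5), ('t', 2), ('u', 3), ('v', 4), ('w', 2),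
    ('x', 3), ('y', 4), ('z', 5)]

def mobile_keyboard (s : String) : Int :=
  -- for i in range(len(s)): … s[i] …; the index is always in range, so pyGetD is exact here;
  -- mob[s[i]] is guarded by 'if s[i] in mob', so getD 0 is exact too
  (PySem.List.pyRange 0 (s.toList.length : Int) 1).foldl
    (fun c i =>
      let ch := PySem.List.pyGetD s.toList i ' '
      if pvMob.contains ch then c + pvMob.getD ch 0 else c + 1) 0

-- ===== PORT B =====
-- keystrokes(c): closed-form cost; '%' on a nonnegative int, ported exactly via PySem.Int.mod
def pvKeystrokes (c : Char) : Int :=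
  if ¬ ('a' ≤ c ∧ c ≤ 'z') then 1
  else if c = 's' ∨ c = 'z' then 5
  else
    let k : Int := (c.toNat : Int) - ((('a').toNat : Nat) : Int) - (if 's' < c then 1 else 0)
    PySem.Int.mod k 3 + 2

def mobile_keyboard_alt (s : String) : Int :=
  -- sum(keystrokes(c) for c in s)
  (s.toList.map pvKeystrokes).sum

-- ===== PRECONDITION & SPEC =====
def Spec_mobile_keyboard (s : String) (out : Int) : Prop := out = mobile_keyboard_alt s
instance (s : String) (out : Int) : Decidable (Spec_mobile_keyboard s out) := by unfold Spec_mobile_keyboard; infer_instance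

-- ===== CLAIM (what is proved, stated in full; the proofs are below) =====
def Claim_equal_mobile_keyboard : Prop := ∀ (s : String), Dom_mobile_keyboard s → Spec_mobile_keyboard s (mobile_keyboard s)

-- ===== LEMMAS AND PROOFS =====

-- the two per-character costs agree on every character below code 128 (enumerated)
theorem pv_aux : ∀ n : Nat, n < 128 →
    (if pvMob.contains (Char.ofNat n) then pvMob.getD (Char.ofNat n) 0 else 1)
      = pvKeystrokes (Char.ofNat n) := by decide

theorem pvStep_eq (c : Char) (hc : c.toNat < 128) :
    (if pvMob.contains c then pvMob.getD c 0 else 1) = pvKeystrokes c := by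
  have := pv_aux c.toNat hc
  rwa [Char.ofNat_toNat] at this

theorem pvCharLt128 (c : Char) (h : pvDomChar c = true) : c.toNat < 128 := by
  unfold pvDomChar at h
  simp only [Bool.or_eq_true, Bool.and_eq_true, decide_eq_true_eq, beq_iff_eq] at h
  omega

-- A's indexed loop is the fold over the character list
theorem pvA_foldl (s : String) :
    mobile_keyboard s = s.toList.foldl
      (fun c ch => if pvMob.contains ch then c + pvMob.getD ch 0 else c + 1) 0 := by
  unfold mobile_keyboard
  exact PySem.List.foldl_pyRange_zero_pyGetD' s.toList ' '
    (fun c ch => if pvMob.contains ch then c + pvMob.getD ch 0 else c + 1) 0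

theorem pvFold_eq (l : List Char) (hl : ∀ c ∈ l, c.toNat < 128) (a : Int) :
    l.foldl (fun c ch => if pvMob.contains ch then c + pvMob.getD ch 0 else c + 1) a =
    a + (l.map pvKeystrokes).sum := by
  induction l generalizing a with
  | nil => simp
  | cons ch t ih =>
    simp only [List.foldl_cons, List.map_cons, List.sum_cons]
    rw [ih (fun c hc => hl c (List.mem_cons_of_mem _ hc))]
    rw [← pvStep_eq ch (hl ch List.mem_cons_self)]
    split <;> ring

-- ===== VERDICT (by name: the statement is the Claim_ definition above) =====
theorem mobile_keyboard_spec : Claim_equal_mobile_keyboard := by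
  intro s hdom
  unfold Spec_mobile_keyboard mobile_keyboard_alt
  rw [pvA_foldl,
    pvFold_eq _ (fun c hc => pvCharLt128 c (List.all_eq_true.mp hdom c hc)) 0,
    zero_add]
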